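-- pv_equiv track=rewrite | github.com/woaiwinnie2/TCAMImageCompression | point_encoder.py | point_encoding
-- ===== SOURCE A (Python) =====
-- def point_encoding(point, W,h):
--
--     logh = h.bit_length() - 1
--     prefix_keep = W - logh + 1
--
--     gray = point ^ (point >> 1)  # BRGC conversion
--     brgc_str = format(gray, f'0{W}b')  # Pad to 'bits' length
--
--     extra_bits = []
--     for i in range(h):
--         if i == 0 or i == h // 2:
--             continue
--         val = ((point - i) // h) % 2
--         extra_bits.append(str(1 - int(val)))
--
--     BRGC_prefix= brgc_str[:prefix_keep]
--
--     result=list(BRGC_prefix) + extra_bits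
--
--     return "".join(result)
-- ===== SOURCE B (Python) =====
-- def point_encoding(point, W, h):
--     logh = h.bit_length() - 1
--     prefix_keep = W - logh + 1
--     gray = point ^ (point >> 1)  # BRGC conversion
--     prefix = format(gray, f'0{W}b')[:prefix_keep]
--     if h <= 2:
--         return prefix  # the skip indices 0 and h//2 cover the whole bucket range
--     q, r = divmod(point, h)
--     # ((point - i) // h) % 2 is q % 2 for i <= r and (q - 1) % 2 for i > r,
--     # so the per-bucket bits are two constant runs; then drop indices h//2 and 0.
--     bits = [str(1 - q % 2)] * (r + 1) + [str(q % 2)] * (h - 1 - r)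
--     del bits[h // 2]
--     del bits[0]
--     return prefix + "".join(bits)
-- ===== Notes on version B (the rewrite author's own statement) =====
-- stated objective: faster
-- what changed: replaces the per-index floor-division loop by one divmod(point, h): the h parity bits are two constant runs [1-q%2]*(r+1)+[q%2]*(h-1-r) built by list multiplication, from which the skip indices h//2 and 0 are deleted
import Mathlib
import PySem

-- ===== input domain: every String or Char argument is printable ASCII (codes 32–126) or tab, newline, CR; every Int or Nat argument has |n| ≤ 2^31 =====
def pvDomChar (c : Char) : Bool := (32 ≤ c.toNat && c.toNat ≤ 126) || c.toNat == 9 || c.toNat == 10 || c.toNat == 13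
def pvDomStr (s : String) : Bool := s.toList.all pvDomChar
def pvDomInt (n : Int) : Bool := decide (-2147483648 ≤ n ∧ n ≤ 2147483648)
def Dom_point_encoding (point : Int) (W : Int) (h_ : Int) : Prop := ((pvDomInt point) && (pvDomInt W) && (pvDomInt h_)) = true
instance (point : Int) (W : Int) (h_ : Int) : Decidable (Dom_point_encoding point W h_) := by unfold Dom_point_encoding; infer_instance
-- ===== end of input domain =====

-- B replaces A's per-index division loop by one divmod: the parity bits are two
-- constant runs from which the two skip indices are deleted (measured faster in a timing run).

-- ===== PORT A =====
-- format(gray, f'0{W}b') = format(gray, 'b').zfill(W), exact for 0 ≤ W (Pre_); gray here is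
-- always ≥ 0 (x ^ (x >> 1) of two negatives is nonnegative), matching Python's sign handling.
def point_encoding (point : Int) (W : Int) (h_ : Int) : String :=
  let logh : Int := (PySem.Int.bitLength h_ : Int) - 1
  let prefix_keep : Int := W - logh + 1
  let gray : Int := PySem.Int.bxor point (point >>> (1 : Nat))
  let brgc_str : String := PySem.Str.zfill (PySem.Int.toBin gray) W
  let extra_bits : List String :=
    (PySem.List.pyRange 0 h_ 1).foldl (fun acc i =>
      if i = 0 ∨ i = PySem.Int.floordiv h_ 2 then acc
      else acc ++ [PySem.Int.toStr (1 - PySem.Int.mod (PySem.Int.floordiv (point - i) h_) 2)]) []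
  let BRGC_prefix : String := PySem.Str.slice brgc_str none (some prefix_keep)
  let result : List String := BRGC_prefix.toList.map (fun c => String.ofList [c]) ++ extra_bits
  PySem.Str.join "" result

-- ===== PORT B =====
def point_encoding_alt (point : Int) (W : Int) (h_ : Int) : String :=
  let logh : Int := (PySem.Int.bitLength h_ : Int) - 1
  let prefix_keep : Int := W - logh + 1
  let gray : Int := PySem.Int.bxor point (point >>> (1 : Nat))
  let pfx : String := PySem.Str.slice (PySem.Str.zfill (PySem.Int.toBin gray) W) none (some prefix_keep)
  if h_ ≤ 2 then pfx
  else
    let q : Int := PySem.Int.floordiv point h_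
    let r : Int := PySem.Int.mod point h_
    let bits : List String :=
      List.replicate (r + 1).toNat (PySem.Int.toStr (1 - PySem.Int.mod q 2))
        ++ List.replicate (h_ - 1 - r).toNat (PySem.Int.toStr (PySem.Int.mod q 2))
    -- del bits[h // 2]; del bits[0]  (both indices in range since 3 ≤ h_)
    let bits := bits.eraseIdx (PySem.Int.floordiv h_ 2).toNat
    let bits := bits.eraseIdx 0
    pfx ++ PySem.Str.join "" bits

-- ===== PRECONDITION & SPEC =====
-- A raises ValueError for W < 0 (the format spec f'0{W}b' is then invalid); that is all Pre_ excludes.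
def Pre_point_encoding (point : Int) (W : Int) (h_ : Int) : Prop := 0 ≤ W
instance (point : Int) (W : Int) (h_ : Int) : Decidable (Pre_point_encoding point W h_) := by unfold Pre_point_encoding; infer_instance
def pvWitness_point_encoding : Int × Int × Int := (5, 4, 3)

def Spec_point_encoding (point : Int) (W : Int) (h_ : Int) (out : String) : Prop := out = point_encoding_alt point W h_
instance (point : Int) (W : Int) (h_ : Int) (out : String) : Decidable (Spec_point_encoding point W h_ out) := by unfold Spec_point_encoding; infer_instance

-- ===== CLAIM (what is proved, stated in full; the proofs are below) =====
def Claim_equal_point_encoding : Prop := ∀ (point : Int) (W : Int) (h_ : Int), Dom_point_encoding point W h_ → Pre_point_encoding point W h_ → Spec_point_encoding point W h_ (point_encoding point W h_)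

-- ===== LEMMAS AND PROOFS =====

-- "".join with an empty separator concatenates.
theorem pv_join_nil_flatten (parts : List (List Char)) :
    PySem.Chars.join [] parts = parts.flatten := by
  induction parts with
  | nil => simpa using PySem.Chars.join_nil ([] : List Char)
  | cons p rest ih =>
    cases rest with
    | nil => simpa using PySem.Chars.join_singleton [] p
    | cons q t => simp [PySem.Chars.join_cons_cons, ih]

-- the skip-and-append loop is a filter-map
theorem pv_foldl_skip {α : Type} (c : Int → Prop) [DecidablePred c] (f : Int → α) :
    ∀ (l : List Int) (acc : List α),
      l.foldl (fun acc i => if c i then acc else acc ++ [f i]) acc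
        = acc ++ (l.filter (fun i => !(decide (c i)))).map f := by
  intro l
  induction l with
  | nil => simp
  | cons x xs ih =>
    intro acc
    by_cases hx : c x <;> simp [List.foldl_cons, hx, ih]

-- floor-division shift: for 0 ≤ i < h, (point - i) // h is q or q - 1 around r = point % h
theorem pv_fdiv_shift (point h_ i : Int) (hh : 0 < h_) (hi0 : 0 ≤ i) (hih : i < h_) :
    PySem.Int.floordiv (point - i) h_
      = if i ≤ PySem.Int.mod point h_ then PySem.Int.floordiv point h_
        else PySem.Int.floordiv point h_ - 1 := by
  rw [PySem.Int.floordiv_eq_ediv_of_pos hh, PySem.Int.floordiv_eq_ediv_of_pos hh,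
      PySem.Int.mod_eq_emod_of_pos hh]
  have hpoint := Int.ediv_add_emod point h_
  have hr0 : 0 ≤ point % h_ := Int.emod_nonneg point (by omega)
  have hrh : point % h_ < h_ := Int.emod_lt_of_pos point hh
  split_ifs with hle
  · have h1 : point - i = (point % h_ - i) + (point / h_) * h_ := by linarith
    rw [h1, Int.add_mul_ediv_right _ _ (by omega : h_ ≠ 0),
        Int.ediv_eq_zero_of_lt (by omega) (by omega)]
    omega
  · have h1 : point - i = (point % h_ - i + h_) + (point / h_ - 1) * h_ := by ring_nf; linarith
    rw [h1, Int.add_mul_ediv_right _ _ (by omega : h_ ≠ 0),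
        Int.ediv_eq_zero_of_lt (by omega) (by omega)]
    omega

theorem pv_mod_two_pred (q : Int) :
    PySem.Int.mod (q - 1) 2 = 1 - PySem.Int.mod q 2 := by
  rw [PySem.Int.mod_eq_emod_of_pos (by omega), PySem.Int.mod_eq_emod_of_pos (by omega)]
  omega

-- a map whose function is constant on a pyRange is a replicate
theorem pv_map_const_pyRange {α : Type} (f : Int → α) (a b : Int) (v : α)
    (hf : ∀ i, a ≤ i → i < b → f i = v) :
    (PySem.List.pyRange a b 1).map f = List.replicate (b - a).toNat v := by
  have h1 : ∀ i ∈ PySem.List.pyRange a b 1, f i = v := by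
    intro i hi
    rw [PySem.List.mem_pyRange_one] at hi
    exact hf i hi.1 hi.2
  calc (PySem.List.pyRange a b 1).map f
      = (PySem.List.pyRange a b 1).map (fun _ => v) := List.map_congr_left h1
    _ = List.replicate (PySem.List.pyRange a b 1).length v := by
        simp [List.map_const']
    _ = List.replicate (b - a).toNat v := by rw [PySem.List.length_pyRange_one]

-- the main body lemma, h_ ≥ 3
theorem pv_body (point h_ : Int) (hh : 3 ≤ h_) :
    (PySem.List.pyRange 0 h_ 1).foldl (fun acc i =>
        if i = 0 ∨ i = PySem.Int.floordiv h_ 2 then acc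
        else acc ++ [PySem.Int.toStr (1 - PySem.Int.mod (PySem.Int.floordiv (point - i) h_) 2)]) []
    = ((List.replicate (PySem.Int.mod point h_ + 1).toNat
          (PySem.Int.toStr (1 - PySem.Int.mod (PySem.Int.floordiv point h_) 2))
        ++ List.replicate (h_ - 1 - PySem.Int.mod point h_).toNat
          (PySem.Int.toStr (PySem.Int.mod (PySem.Int.floordiv point h_) 2))).eraseIdx
            (PySem.Int.floordiv h_ 2).toNat).eraseIdx 0 := by
  have hpos : (0 : Int) < h_ := by omega
  set q := PySem.Int.floordiv point h_ with hq
  set r := PySem.Int.mod point h_ with hr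
  have hr0 : 0 ≤ r := PySem.Int.mod_nonneg point hpos
  have hrh : r < h_ := PySem.Int.mod_lt point hpos
  set p := PySem.Int.floordiv h_ 2 with hp
  have hp_bounds : 1 ≤ p ∧ p < h_ := by
    rw [hp, PySem.Int.floordiv_eq_ediv_of_pos (by omega)]; omega
  set c0 := PySem.Int.toStr (1 - PySem.Int.mod q 2) with hc0
  set c1 := PySem.Int.toStr (PySem.Int.mod q 2) with hc1
  set g : Int → String := fun i => if i ≤ r then c0 else c1 with hg
  set f : Int → String :=
    fun i => PySem.Int.toStr (1 - PySem.Int.mod (PySem.Int.floordiv (point - i) h_) 2) with hf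
  have hfg : ∀ i, 0 ≤ i → i < h_ → f i = g i := by
    intro i h0 h1
    rw [hf, hg]
    simp only
    rw [pv_fdiv_shift point h_ i hpos h0 h1, ← hq, ← hr]
    split_ifs with hle
    · rfl
    · rw [pv_mod_two_pred, hc1]; ring_nf
  -- LHS: filter-map over the range
  rw [pv_foldl_skip (fun i => i = 0 ∨ i = p) _ (PySem.List.pyRange 0 h_ 1) []]
  -- split the range at p and peel off 0 and p
  have hsplit : PySem.List.pyRange 0 h_ 1
      = 0 :: PySem.List.pyRange 1 p 1 ++ p :: PySem.List.pyRange (p + 1) h_ 1 := by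
    rw [PySem.List.pyRange_one_append 0 p h_ (by omega) (by omega),
        PySem.List.pyRange_one_cons (by omega : (0:Int) < p),
        PySem.List.pyRange_one_cons (by omega : p < h_)]
    simp
  have hfilter1 : (PySem.List.pyRange 1 p 1).filter (fun i => !(decide (i = 0 ∨ i = p)))
      = PySem.List.pyRange 1 p 1 := by
    apply List.filter_eq_self.mpr
    intro i hi
    rw [PySem.List.mem_pyRange_one] at hi
    simp; omega
  have hfilter2 : (PySem.List.pyRange (p + 1) h_ 1).filter (fun i => !(decide (i = 0 ∨ i = p)))
      = PySem.List.pyRange (p + 1) h_ 1 := by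
    apply List.filter_eq_self.mpr
    intro i hi
    rw [PySem.List.mem_pyRange_one] at hi
    simp; omega
  have hL : ((PySem.List.pyRange 0 h_ 1).filter (fun i => !(decide (i = 0 ∨ i = p)))).map f
      = (PySem.List.pyRange 1 p 1).map g ++ (PySem.List.pyRange (p + 1) h_ 1).map g := by
    rw [hsplit, List.filter_append,
        List.filter_cons_of_neg (by simp),
        List.filter_cons_of_neg (by simp),
        hfilter1, hfilter2, List.map_append]
    congr 1
    · apply List.map_congr_left; intro i hi
      rw [PySem.List.mem_pyRange_one] at hi; exact hfg i (by omega) (by omega)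
    · apply List.map_congr_left; intro i hi
      rw [PySem.List.mem_pyRange_one] at hi; exact hfg i (by omega) (by omega)
  rw [hL]
  -- RHS: the replicate runs are the map of g over the full range, then erase indices p and 0
  have hruns : List.replicate (r + 1).toNat c0 ++ List.replicate (h_ - 1 - r).toNat c1
      = (PySem.List.pyRange 0 h_ 1).map g := by
    rw [PySem.List.pyRange_one_append 0 (r + 1) h_ (by omega) (by omega), List.map_append]
    congr 1
    · rw [pv_map_const_pyRange g 0 (r + 1) c0 (by intro i h0 h1; simp [hg]; omega)]
      norm_num
    · rw [pv_map_const_pyRange g (r + 1) h_ c1 (by intro i h0 h1; simp [hg]; intro hle; omega)]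
      congr 1; omega
  rw [hruns, hsplit]
  simp only [List.map_append, List.map_cons]
  have hlen : (g 0 :: (PySem.List.pyRange 1 p 1).map g).length = p.toNat := by
    simp [PySem.List.length_pyRange_one]; omega
  rw [show g 0 :: ((PySem.List.pyRange 1 p 1).map g)
        ++ g p :: ((PySem.List.pyRange (p + 1) h_ 1).map g)
      = (g 0 :: (PySem.List.pyRange 1 p 1).map g)
        ++ (g p :: (PySem.List.pyRange (p + 1) h_ 1).map g) by simp]
  rw [List.eraseIdx_append_of_length_le (by omega) _]
  rw [hlen]
  simp

-- the h_ ≤ 2 case: every index of range(h_) is skipped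
theorem pv_loop_small (point h_ : Int) (hh : h_ ≤ 2) :
    (PySem.List.pyRange 0 h_ 1).foldl (fun acc i =>
        if i = 0 ∨ i = PySem.Int.floordiv h_ 2 then acc
        else acc ++ [PySem.Int.toStr (1 - PySem.Int.mod (PySem.Int.floordiv (point - i) h_) 2)]) []
    = [] := by
  rw [pv_foldl_skip (fun i => i = 0 ∨ i = PySem.Int.floordiv h_ 2) _ _ []]
  have : (PySem.List.pyRange 0 h_ 1).filter
      (fun i => !(decide (i = 0 ∨ i = PySem.Int.floordiv h_ 2))) = [] := by
    apply List.filter_eq_nil_iff.mpr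
    intro i hi
    rw [PySem.List.mem_pyRange_one] at hi
    have hp : PySem.Int.floordiv h_ 2 = 1 ∨ i = 0 := by
      rw [PySem.Int.floordiv_eq_ediv_of_pos (by omega)]
      omega
    simp
    omega
  rw [this]; simp

-- join of the char-singletons of a string is the string
theorem pv_join_singletons (s : String) (rest : List String) :
    PySem.Str.join "" (s.toList.map (fun c => String.ofList [c]) ++ rest)
      = s ++ PySem.Str.join "" rest := by
  apply String.toList_injective
  rw [String.toList_append, PySem.Str.toList_join, PySem.Str.toList_join,
      show ("" : String).toList = ([] : List Char) from rfl,
      pv_join_nil_flatten, pv_join_nil_flatten,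
      List.map_append, List.flatten_append, List.map_map]
  congr 1
  have hcomp : (String.toList ∘ fun c => String.ofList [c]) = fun c : Char => [c] := by
    funext c; simp [Function.comp]
  rw [hcomp]
  induction s.toList with
  | nil => rfl
  | cons c cs ih => simp [ih]

-- ===== VERDICT (by name: the statement is the Claim_ definition above) =====
theorem point_encoding_spec : Claim_equal_point_encoding := by
  intro point W h_ _hdom _hpre
  unfold Spec_point_encoding point_encoding point_encoding_alt
  simp only []
  by_cases hh : h_ ≤ 2
  · rw [if_pos hh, pv_loop_small point h_ hh]
    rw [pv_join_singletons]
    have hjoin : PySem.Str.join "" ([] : List String) = "" := by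
      apply String.toList_injective
      rw [PySem.Str.toList_join, show ("" : String).toList = ([] : List Char) from rfl,
          pv_join_nil_flatten]
      simp
    rw [hjoin]
    simp
  · rw [if_neg hh, pv_body point h_ (by omega), pv_join_singletons]
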